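-- pv_equiv track=rewrite | github.com/Guray00/aoc23 | 07/solution.py | hand_to_num
-- ===== SOURCE A (Python) =====
-- def hand_to_num(hand, jolly=False):
--     if not jolly:
--         ordering_map = {'A': 12, 'K': 11, 'Q': 10, 'J': 9, 'T': 8, '9': 7, '8': 6, '7': 5, '6': 4, '5': 3, '4': 2, '3': 1, '2': 0}
--     else:
--         ordering_map = {'A': 12, 'K': 11, 'Q': 10, 'T': 9, '9': 8, '8': 7, '7': 6, '6': 5, '5': 4, '4': 3, '3': 2, '2': 1, 'J': 0}
--
--     value = 0
--     for char in hand: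
--         value = value*13 + ordering_map[char] # converto in base 13
--
--     return value
-- ===== SOURCE B (Python) =====
-- def hand_to_num(hand, jolly=False):
--     # divide and conquer: split the hand in half, combine with a place-value shift;
--     # a single card's digit is its position in a rank-order string (no dict).
--     order = "J23456789TQKA" if jolly else "23456789TJQKA"
--
--     def go(s):
--         n = len(s)
--         if n == 0:
--             return 0
--         if n == 1:
--             return order.index(s)
--         m = n // 2
--         return go(s[:m]) * 13 ** (n - m) + go(s[m:])
--
--     return go(hand)
-- ===== Notes on version B (the rewrite author's own statement) =====
-- stated objective: alternative
-- what changed: Replaces the left-to-right Horner fold over a dict by a divide-and-conquer recursion: split the hand in half, recursively convert each half and combine as left*13**len(right)+right, with a single card's digit read as its position in a rank-order string instead of a dict lookup.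
import Mathlib
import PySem

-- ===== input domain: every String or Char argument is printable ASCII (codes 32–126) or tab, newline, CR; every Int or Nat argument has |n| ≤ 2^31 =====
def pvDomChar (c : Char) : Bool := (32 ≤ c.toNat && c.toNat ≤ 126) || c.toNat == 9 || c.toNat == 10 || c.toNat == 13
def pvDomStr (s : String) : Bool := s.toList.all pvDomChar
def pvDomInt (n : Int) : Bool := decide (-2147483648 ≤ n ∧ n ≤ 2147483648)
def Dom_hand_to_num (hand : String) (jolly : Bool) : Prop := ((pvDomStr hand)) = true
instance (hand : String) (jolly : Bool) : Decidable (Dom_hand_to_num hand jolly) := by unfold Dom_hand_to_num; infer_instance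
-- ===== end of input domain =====

-- B replaces A's Horner fold over a dict by a divide-and-conquer recursion on the hand halves
-- with digits read from a rank-order string (alternative decomposition, same exact value);
-- equivalence proved on hands made of valid card characters (elsewhere both raise).

-- ===== PORT A =====
def orderingMapPlain : PySem.Dict Char Int :=
  PySem.Dict.ofList [('A', 12), ('K', 11), ('Q', 10), ('J', 9), ('T', 8), ('9', 7), ('8', 6), ('7', 5), ('6', 4), ('5', 3), ('4', 2), ('3', 1), ('2', 0)]
def orderingMapJolly : PySem.Dict Char Int :=
  PySem.Dict.ofList [('A', 12), ('K', 11), ('Q', 10), ('T', 9), ('9', 8), ('8', 7), ('7', 6), ('6', 5), ('5', 4), ('4', 3), ('3', 2), ('2', 1), ('J', 0)]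

-- ordering_map[char]: Python raises KeyError on a missing key; getD 0 is exact under Pre_ (all chars are keys)
def hand_to_num (hand : String) (jolly : Bool) : Int :=
  let ordering_map := if !jolly then orderingMapPlain else orderingMapJolly
  hand.toList.foldl (fun value char => value * 13 + PySem.Dict.getD ordering_map char 0) 0

-- ===== PORT B =====
-- go(s) from Source B. The extra Nat argument is only a fuel/totalization guard (each recursive call
-- halves a list of length ≥ 2, so fuel = initial length never runs out; the fuel-0 branch is
-- unreachable). order.index(s) on a one-char string: Python raises ValueError if absent; the
-- list index with default 0 is exact under Pre_ (every card char occurs in the order string).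
def bGo (order : List Char) : Nat → List Char → Int
  | _, [] => 0
  | _, [c] => ((PySem.List.index? order c).getD 0 : Int)
  | 0, _ :: _ :: _ => 0
  | fuel + 1, c1 :: c2 :: rest =>
      bGo order fuel ((c1 :: c2 :: rest).take ((c1 :: c2 :: rest).length / 2))
          * 13 ^ ((c1 :: c2 :: rest).length - (c1 :: c2 :: rest).length / 2)
        + bGo order fuel ((c1 :: c2 :: rest).drop ((c1 :: c2 :: rest).length / 2))

def hand_to_num_alt (hand : String) (jolly : Bool) : Int :=
  let order := if jolly then "J23456789TQKA".toList else "23456789TJQKA".toList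
  bGo order hand.toList.length hand.toList

-- ===== PRECONDITION & SPEC =====
-- Pre_ excludes exactly the hands containing a character that is not a card symbol: there A raises KeyError (and B raises ValueError).
def Pre_hand_to_num (hand : String) (jolly : Bool) : Prop :=
  (hand.toList.all (fun c => ['A', 'K', 'Q', 'J', 'T', '9', '8', '7', '6', '5', '4', '3', '2'].contains c)) = true
instance (hand : String) (jolly : Bool) : Decidable (Pre_hand_to_num hand jolly) := by
  unfold Pre_hand_to_num; infer_instance
def pvWitness_hand_to_num : String × Bool := ("AKQJT", false)

def Spec_hand_to_num (hand : String) (jolly : Bool) (out : Int) : Prop := out = hand_to_num_alt hand jolly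
instance (hand : String) (jolly : Bool) (out : Int) : Decidable (Spec_hand_to_num hand jolly out) := by unfold Spec_hand_to_num; infer_instance

-- ===== CLAIM =====
def Claim_equal_hand_to_num : Prop := ∀ (hand : String) (jolly : Bool), Dom_hand_to_num hand jolly → Pre_hand_to_num hand jolly → Spec_hand_to_num hand jolly (hand_to_num hand jolly)

-- ===== LEMMAS AND PROOFS =====

-- Horner's fold started at v equals v shifted by the length plus the fold started at 0
theorem horner_shift (d : Char → Int) (l : List Char) (v : Int) :
    l.foldl (fun a c => a * 13 + d c) v
      = v * 13 ^ l.length + l.foldl (fun a c => a * 13 + d c) 0 := by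
  induction l generalizing v with
  | nil => simp
  | cons c l ih =>
      simp only [List.foldl_cons, List.length_cons]
      rw [ih (v * 13 + d c), ih (0 * 13 + d c)]
      ring

-- B's divide-and-conquer equals A's Horner fold, whenever the fuel covers the length and
-- every char of s is a card character
theorem bGo_eq_horner (order : List Char) (dmap : PySem.Dict Char Int)
    (cards : List Char)
    (hd : ∀ c ∈ cards, ((PySem.List.index? order c).getD 0 : Int) = PySem.Dict.getD dmap c 0)
    (fuel : Nat) (s : List Char) (hlen : s.length ≤ fuel + 1) (hs : ∀ c ∈ s, c ∈ cards) :
    bGo order fuel s = s.foldl (fun a c => a * 13 + PySem.Dict.getD dmap c 0) 0 := by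
  induction fuel generalizing s with
  | zero =>
      match s, hlen with
      | [], _ => simp [bGo]
      | [c], _ =>
          simp only [bGo, List.foldl_cons, List.foldl_nil]
          rw [hd c (hs c (by simp))]
          ring
      | c1 :: c2 :: rest, hlen => simp at hlen
  | succ fuel ih =>
      match s with
      | [] => simp [bGo]
      | [c] =>
          simp only [bGo, List.foldl_cons, List.foldl_nil]
          rw [hd c (hs c (by simp))]
          ring
      | c1 :: c2 :: rest =>
          rw [bGo]
          have hn : (c1 :: c2 :: rest).length = rest.length + 2 := by simp
          rw [ih _ (by simp only [List.length_take, hn]; omega)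
                (fun c hc => hs c (List.mem_of_mem_take hc)),
              ih _ (by simp only [List.length_drop, hn] at hlen ⊢; omega)
                (fun c hc => hs c (List.mem_of_mem_drop hc))]
          conv_rhs => rw [← List.take_append_drop ((c1 :: c2 :: rest).length / 2) (c1 :: c2 :: rest)]
          rw [List.foldl_append,
            horner_shift _ (List.drop ((c1 :: c2 :: rest).length / 2) (c1 :: c2 :: rest))
              (List.foldl (fun a c => a * 13 + PySem.Dict.getD dmap c 0) 0
                (List.take ((c1 :: c2 :: rest).length / 2) (c1 :: c2 :: rest)))]
          simp only [List.length_drop]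

set_option maxRecDepth 8000 in
theorem hand_to_num_eq (hand : String) (jolly : Bool)
    (hp : Pre_hand_to_num hand jolly) :
    hand_to_num hand jolly = hand_to_num_alt hand jolly := by
  unfold Pre_hand_to_num at hp
  rw [List.all_eq_true] at hp
  cases jolly with
  | false =>
      have h := bGo_eq_horner ("23456789TJQKA".toList) orderingMapPlain
        ['A', 'K', 'Q', 'J', 'T', '9', '8', '7', '6', '5', '4', '3', '2']
        (by intro c hc; fin_cases hc <;> decide) hand.toList.length hand.toList (by omega)
        (fun c hc => by simpa using hp c hc)
      simpa [hand_to_num, hand_to_num_alt] using h.symm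
  | true =>
      have h := bGo_eq_horner ("J23456789TQKA".toList) orderingMapJolly
        ['A', 'K', 'Q', 'J', 'T', '9', '8', '7', '6', '5', '4', '3', '2']
        (by intro c hc; fin_cases hc <;> decide) hand.toList.length hand.toList (by omega)
        (fun c hc => by simpa using hp c hc)
      simpa [hand_to_num, hand_to_num_alt] using h.symm

-- ===== VERDICT =====
theorem hand_to_num_spec : Claim_equal_hand_to_num := by
  intro hand jolly _ hp
  exact hand_to_num_eq hand jolly hp
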